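-- pv_equiv track=rewrite | github.com/adamcameron/cfml | languageComparison/getSubseries/getSubseries.py | getSubseries
-- ===== SOURCE A (Python) =====
-- import functools
--
-- def getSubseries(series,threshold):
-- 	working = []
-- 	def reduceCallback(reduction, current):
-- 		working.append(current)
-- 		while sum(working) > threshold:
-- 			working.pop(0)
-- 		workingIsBetterForLength	= len(working) > len(reduction)
-- 		workingIsBetterForTotal		= len(working) == len(reduction) and sum(working) > sum(reduction)
--
-- 		return list(working) if workingIsBetterForLength or workingIsBetterForTotal else reduction
-- 	return functools.reduce(reduceCallback, series, [])
-- ===== SOURCE B (Python) =====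
-- def getSubseries(series, threshold):
--     best_start = best_end = 0   # best window as slice indices
--     best_len = 0
--     best_sum = 0
--     start = 0
--     s = 0
--     for end, x in enumerate(series):
--         s += x
--         while s > threshold and start <= end:
--             s -= series[start]
--             start += 1
--         length = end - start + 1
--         if length > best_len or (length == best_len and s > best_sum):
--             best_len, best_sum = length, s
--             best_start, best_end = start, end + 1
--     return series[best_start:best_end]
-- ===== Notes on version B (the rewrite author's own statement) =====
-- stated objective: faster
-- what changed: Replaces the functools.reduce that re-sums and copies the whole window on every step with a single sliding-window pass keeping an incremental running sum and the best window as slice indices.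
-- crash fix: On a negative threshold A raises IndexError (pop from an empty window) as soon as every window suffix ending at some position sums above the threshold; B returns the best window found so far (e.g. [] on ([1], -1)). — e.g. on getSubseries([1], -1): A raises IndexError, B returns []
import Mathlib
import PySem

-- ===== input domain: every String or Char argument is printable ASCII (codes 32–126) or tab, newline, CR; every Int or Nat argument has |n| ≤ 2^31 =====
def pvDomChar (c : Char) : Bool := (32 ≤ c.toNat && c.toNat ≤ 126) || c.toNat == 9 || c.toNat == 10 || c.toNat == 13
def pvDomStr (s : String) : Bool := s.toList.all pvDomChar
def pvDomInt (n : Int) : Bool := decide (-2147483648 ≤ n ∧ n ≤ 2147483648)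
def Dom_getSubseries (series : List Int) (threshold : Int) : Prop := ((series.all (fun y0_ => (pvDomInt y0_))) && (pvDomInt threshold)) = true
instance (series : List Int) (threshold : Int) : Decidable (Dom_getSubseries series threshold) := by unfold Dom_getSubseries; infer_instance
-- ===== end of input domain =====

-- B replaces A's quadratic reduce (re-summing and copying the window at every step) by a
-- one-pass sliding window with an incremental running sum and best-window indices (objective: faster).


-- ===== PORT A =====
-- `while sum(working) > threshold: working.pop(0)`; on the empty list Python would raise
-- IndexError when 0 > threshold (excluded by Pre_) — the port stops there instead.
def popLoopA (t : Int) : List Int → List Int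
  | [] => []
  | w :: ws => if (w :: ws).sum > t then popLoopA t ws else w :: ws

-- reduceCallback: state is (reduction, working)
def stepA (t : Int) (st : List Int × List Int) (cur : Int) : List Int × List Int :=
  let working := popLoopA t (st.2 ++ [cur])
  if working.length > st.1.length ∨ (working.length = st.1.length ∧ working.sum > st.1.sum) then
    (working, working)
  else
    (st.1, working)

def getSubseries (series : List Int) (threshold : Int) : List Int :=
  (series.foldl (stepA threshold) ([], [])).1

-- ===== PORT B =====
-- `while s > threshold and start <= end: s -= series[start]; start += 1`
-- (series[start] is always in range when read; pyGetD's default is never used)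
def shrinkB (series : List Int) (t : Int) (endIdx : Int) (start : Int) (s : Int) : Int × Int :=
  if s > t ∧ start ≤ endIdx then
    shrinkB series t endIdx (start + 1) (s - PySem.List.pyGetD series start 0)
  else
    (start, s)
termination_by (endIdx + 1 - start).toNat
decreasing_by omega

-- loop body; state (best_start, best_end, best_len, best_sum, start, s), kx = (end, x)
def stepB (series : List Int) (t : Int) (st : Int × Int × Int × Int × Int × Int)
    (kx : Int × Int) : Int × Int × Int × Int × Int × Int :=
  let p := shrinkB series t kx.1 st.2.2.2.2.1 (st.2.2.2.2.2 + kx.2)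
  let len := kx.1 - p.1 + 1
  if len > st.2.2.1 ∨ (len = st.2.2.1 ∧ p.2 > st.2.2.2.1) then
    (p.1, kx.1 + 1, len, p.2, p.1, p.2)
  else
    (st.1, st.2.1, st.2.2.1, st.2.2.2.1, p.1, p.2)

def getSubseries_alt (series : List Int) (threshold : Int) : List Int :=
  let st := (PySem.List.enumerate series 0).foldl (stepB series threshold) (0, 0, 0, 0, 0, 0)
  PySem.List.slice series (some st.1) (some st.2.1)

-- ===== PRECONDITION & SPEC =====
-- On a negative threshold, A raises IndexError (pop from the empty window) as soon as every
-- window suffix ending at some position sums above the threshold; Pre_ is exactly the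
-- complement, so it admits every input on which A returns.
def Pre_getSubseries (series : List Int) (threshold : Int) : Prop :=
  0 ≤ threshold ∨ ∀ i < series.length, ∃ j ≤ i, ((series.drop j).take (i + 1 - j)).sum ≤ threshold
instance (series : List Int) (threshold : Int) : Decidable (Pre_getSubseries series threshold) := by
  unfold Pre_getSubseries; infer_instance
def pvWitness_getSubseries : List Int × Int := ([1, 2, 3], 3)

-- A raises IndexError exactly when the threshold is negative and at some position every window
-- suffix ending there sums above it; B returns the best window seen so far there
-- (proved below as getSubseries_raises).
def Raises_getSubseries (series : List Int) (threshold : Int) : Prop :=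
  threshold < 0 ∧ ∃ i < series.length, ∀ j ≤ i, threshold < ((series.drop j).take (i + 1 - j)).sum
instance (series : List Int) (threshold : Int) : Decidable (Raises_getSubseries series threshold) := by
  unfold Raises_getSubseries; infer_instance
def pvRaiseWitness_getSubseries : List Int × Int := ([1], -1)
def pvRaiseWitnessOut_getSubseries : List Int := []

def Spec_getSubseries (series : List Int) (threshold : Int) (out : List Int) : Prop := out = getSubseries_alt series threshold
instance (series : List Int) (threshold : Int) (out : List Int) : Decidable (Spec_getSubseries series threshold out) := by unfold Spec_getSubseries; infer_instance

-- ===== CLAIM (what is proved, stated in full; the proofs are below) =====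
def Claim_equal_getSubseries : Prop := ∀ (series : List Int) (threshold : Int), Dom_getSubseries series threshold → Pre_getSubseries series threshold → Spec_getSubseries series threshold (getSubseries series threshold)

def Claim_raises_getSubseries : Prop := (∀ (series : List Int) (threshold : Int), Dom_getSubseries series threshold → Raises_getSubseries series threshold → ¬ Pre_getSubseries series threshold) ∧ (Dom_getSubseries (pvRaiseWitness_getSubseries.1) (pvRaiseWitness_getSubseries.2) ∧ Raises_getSubseries (pvRaiseWitness_getSubseries.1) (pvRaiseWitness_getSubseries.2) ∧ getSubseries_alt (pvRaiseWitness_getSubseries.1) (pvRaiseWitness_getSubseries.2) = pvRaiseWitnessOut_getSubseries)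

-- ===== LEMMAS AND PROOFS =====

-- invariant tying A's state (reduction, working) to B's index state after k elements
def RelAB (series : List Int) (k : Nat) (stA : List Int × List Int)
    (stB : Int × Int × Int × Int × Int × Int) : Prop :=
  ∃ (bs be j : Nat),
    stB = ((bs : Int), (be : Int), (be : Int) - (bs : Int), stA.1.sum, (j : Int), stA.2.sum) ∧
    j ≤ k ∧ stA.2 = (series.take k).drop j ∧
    bs ≤ be ∧ be ≤ k ∧ stA.1 = (series.take be).drop bs

lemma shrinkB_spec (series : List Int) (t : Int) (k : Nat) (hk : k < series.length) :
    ∀ j : Nat, j ≤ k + 1 →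
      ∃ j' : Nat, j ≤ j' ∧ j' ≤ k + 1 ∧
        shrinkB series t (k : Int) (j : Int) ((series.take (k + 1)).drop j).sum
          = ((j' : Int), ((series.take (k + 1)).drop j').sum) ∧
        popLoopA t ((series.take (k + 1)).drop j) = (series.take (k + 1)).drop j' := by
  intro j hj
  induction hn : k + 1 - j generalizing j with
  | zero =>
    have hj1 : j = k + 1 := by omega
    subst hj1
    have hd : (series.take (k + 1)).drop (k + 1) = ([] : List Int) := by
      apply List.drop_eq_nil_of_le; simp
    refine ⟨k + 1, le_rfl, le_rfl, ?_, by simp [hd, popLoopA]⟩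
    rw [hd]
    rw [shrinkB]
    simp only [List.sum_nil]
    have : ¬ ((0 : Int) > t ∧ (↑(k+1) : Int) ≤ (k : Int)) := by push_cast; omega
    rw [if_neg this]
  | succ m ih =>
    have hjk : j ≤ k := by omega
    have hjlen : j < series.length := by omega
    -- the window is nonempty: head is series[j]
    have hlen : (series.take (k + 1)).length = k + 1 := by simp; omega
    have hcons : (series.take (k + 1)).drop j
        = series[j] :: (series.take (k + 1)).drop (j + 1) := by
      rw [List.drop_eq_getElem_cons (by omega)]
      congr 1
      rw [List.getElem_take]
    by_cases hc : ((series.take (k + 1)).drop j).sum > t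
    · -- pop / shrink
      have hget : PySem.List.pyGetD series (j : Int) 0 = series[j] := by
        simp [PySem.List.pyGetD_natCast, hjlen]
      obtain ⟨j', h1, h2, h3, h4⟩ := ih (j + 1) (by omega) (by omega)
      refine ⟨j', by omega, h2, ?_, ?_⟩
      · rw [shrinkB]
        have : ((series.take (k + 1)).drop j).sum > t ∧ (j : Int) ≤ (k : Int) := by
          constructor; exact hc; exact_mod_cast hjk
        simp only [if_pos this, hget]
        have hsum : ((series.take (k + 1)).drop j).sum - series[j]
            = ((series.take (k + 1)).drop (j + 1)).sum := by
          rw [hcons]; simp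
        rw [hsum]
        have : ((j : Int) + 1) = ((j + 1 : Nat) : Int) := by omega
        rw [this]; exact h3
      · rw [hcons, popLoopA]
        rw [← hcons]
        simp only [if_pos hc]
        exact h4
    · -- stop
      refine ⟨j, le_rfl, by omega, ?_, ?_⟩
      · rw [shrinkB]
        have hno : ¬ (((series.take (k + 1)).drop j).sum > t ∧ (j : Int) ≤ (k : Int)) := by
          intro ⟨h, _⟩; exact hc h
        rw [if_neg hno]
      · rw [hcons, popLoopA, ← hcons]
        simp [hc]

lemma step_rel (series : List Int) (t : Int) (k : Nat) (hk : k < series.length)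
    (stA : List Int × List Int) (stB : Int × Int × Int × Int × Int × Int)
    (h : RelAB series k stA stB) :
    RelAB series (k + 1) (stepA t stA series[k]) (stepB series t stB ((k : Int), series[k])) := by
  obtain ⟨bs, be, j, hB, hjk, hw, hbsbe, hbek, hred⟩ := h
  -- working ++ [x] is the next window from index j
  have happ : stA.2 ++ [series[k]] = (series.take (k + 1)).drop j := by
    rw [hw, ← List.drop_append_of_le_length (by simp; omega)]
    congr 1
    rw [List.take_add_one]
    simp [List.getElem?_eq_getElem hk]
  obtain ⟨j', hjj', hj'k, hshr, hpop⟩ := shrinkB_spec series t k hk j (by omega)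
  have hsum2 : stA.2.sum + series[k] = ((series.take (k + 1)).drop j).sum := by
    rw [← happ]; simp
  -- lengths as Ints
  have hlen' : ((series.take (k + 1)).drop j').length = k + 1 - j' := by simp; omega
  have hredlen : stA.1.length = be - bs := by rw [hred]; simp; omega
  unfold stepA stepB
  rw [hB]
  simp only [happ, hsum2, hshr]
  have hcond : ((series.take (k + 1)).drop j').length > stA.1.length ∨
        (((series.take (k + 1)).drop j').length = stA.1.length ∧
          ((series.take (k + 1)).drop j').sum > stA.1.sum)
      ↔ ((k : Int) - (j' : Int) + 1 > (be : Int) - (bs : Int) ∨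
        ((k : Int) - (j' : Int) + 1 = (be : Int) - (bs : Int) ∧
          ((series.take (k + 1)).drop j').sum > stA.1.sum)) := by
    rw [hlen', hredlen]
    constructor
    · rintro (h | ⟨h1, h2⟩)
      · left; omega
      · right; exact ⟨by omega, h2⟩
    · rintro (h | ⟨h1, h2⟩)
      · left; omega
      · right; exact ⟨by omega, h2⟩
  rw [hpop]
  by_cases hc : ((series.take (k + 1)).drop j').length > stA.1.length ∨
      (((series.take (k + 1)).drop j').length = stA.1.length ∧
        ((series.take (k + 1)).drop j').sum > stA.1.sum)
  · rw [if_pos hc, if_pos (hcond.mp hc)]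
    refine ⟨j', k + 1, j', ?_, by omega, by simp, by omega, by omega, by simp⟩
    simp; ring_nf
  · rw [if_neg hc, if_neg (fun h => hc (hcond.mpr h))]
    exact ⟨bs, be, j', rfl, by omega, by simp, hbsbe, by omega, hred⟩

lemma fold_rel (series : List Int) (t : Int) :
    ∀ (rest : List Int) (k : Nat) stA stB, series.take k ++ rest = series →
      RelAB series k stA stB →
      (List.foldl (stepA t) stA rest).1 =
        PySem.List.slice series
          (some ((List.foldl (stepB series t) stB (PySem.List.enumerate rest (k : Int))).1))
          (some ((List.foldl (stepB series t) stB (PySem.List.enumerate rest (k : Int))).2.1)) := by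
  intro rest
  induction rest with
  | nil =>
    intro k stA stB _ h
    obtain ⟨bs, be, j, hB, _, _, hbsbe, _, hred⟩ := h
    simp only [PySem.List.enumerate_nil, List.foldl_nil, hB]
    rw [PySem.List.slice_natCast, hred]
    rw [List.drop_take]
  | cons x rest ih =>
    intro k stA stB hpre h
    have hklen : k < series.length := by
      have := congrArg List.length hpre
      simp at this; omega
    have hx : series[k] = x := by
      have h0 : series[k]? = some x := by
        conv_lhs => rw [← hpre]
        rw [List.getElem?_append_right (by simp)]
        have hz : k - (series.take k).length = 0 := by simp; omega
        rw [hz]; rfl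
      simpa [List.getElem?_eq_getElem hklen] using h0
    simp only [PySem.List.enumerate_cons, List.foldl_cons]
    have hcast : (k : Int) + 1 = ((k + 1 : Nat) : Int) := by omega
    rw [hcast]
    have htake : series.take (k + 1) = series.take k ++ [x] := by
      rw [List.take_add_one]
      simp [List.getElem?_eq_getElem hklen, hx]
    have hpre' : series.take (k + 1) ++ rest = series := by
      conv_rhs => rw [← hpre]
      rw [htake, List.append_assoc]
      rfl
    have hrel' := step_rel series t k hklen stA stB h
    rw [hx] at hrel'
    exact ih (k + 1) _ _ hpre' hrel'

-- ===== VERDICT (by name: the statement is the Claim_ definition above) =====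
theorem getSubseries_spec : Claim_equal_getSubseries := by
  intro series t _ _
  unfold Spec_getSubseries getSubseries getSubseries_alt
  have h0 : RelAB series 0 ([], []) (0, 0, 0, 0, 0, 0) :=
    ⟨0, 0, 0, by simp, le_rfl, by simp, le_rfl, le_rfl, by simp⟩
  simpa using fold_rel series t series 0 ([], []) (0, 0, 0, 0, 0, 0) (by simp) h0

theorem getSubseries_raises : Claim_raises_getSubseries := by
  unfold Claim_raises_getSubseries
  constructor
  · intro series t _ hr hp
    obtain ⟨hneg, i, hi, hall⟩ := hr
    rcases hp with h0 | hforall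
    · omega
    · obtain ⟨j, hj, hle⟩ := hforall i hi
      exact absurd hle (not_le.mpr (hall j hj))
  · refine ⟨by decide, by decide, ?_⟩
    show getSubseries_alt [1] (-1) = []
    have h1 : shrinkB [1] (-1) 0 0 1 = (1, 0) := by
      rw [shrinkB, shrinkB]
      norm_num [PySem.List.pyGetD]
    unfold getSubseries_alt
    simp only [PySem.List.enumerate_cons, PySem.List.enumerate_nil, List.foldl_cons,
      List.foldl_nil, stepB]
    norm_num [h1]
    simp [PySem.List.slice]

-- self-check: the raise witness really lies inside Raises_ (extracted from getSubseries_raises)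
theorem getSubseries_raises_witness_ok :
    Raises_getSubseries (pvRaiseWitness_getSubseries.1) (pvRaiseWitness_getSubseries.2) :=
  getSubseries_raises.2.2.1
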